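-- pv_equiv track=rewrite | github.com/xXDMOGXx/Utilities | schedule_matcher.py | return_perms
-- ===== SOURCE A (Python) =====
-- def return_perms(day_intervals):
--     lists = day_intervals
--     final_list = []
--     for i in range(len(lists[0])):
--         for ii in range(len(lists[1])):
--             final_list.append([lists[0][i], lists[1][ii]])
--     for l in range(len(lists)-2):
--         inter_list = []
--         for i in range(len(final_list)):
--             for ii in range(len(lists[l+2])):
--                 inter_list.append(final_list[i] + [lists[l+2][ii]])
--         final_list = inter_list
--     return final_list
-- ===== SOURCE B (Python) =====
-- def return_perms(day_intervals):
--     if not day_intervals: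
--         return [[]]
--     tails = return_perms(day_intervals[1:])
--     return [[x] + p for x in day_intervals[0] for p in tails]
-- ===== Notes on version B (the rewrite author's own statement) =====
-- stated objective: simpler
-- what changed: Replaced the staged iterative rebuilding of partial tuples (nested index loops extending results on the right) with a short structural recursion that builds each tuple back-to-front by prepending the head list's elements to the recursive product of the tail; Pre_ excludes inputs with fewer than two lists except [[]]: A unconditionally indexes lists[0] and lists[1] and raises IndexError there, while B's recursion returns the product naturally.
-- outside the precondition, e.g. on return_perms([]): A raises IndexError, B returns [[]]; on return_perms([[1]]): A raises IndexError, B returns [[1]]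
import Mathlib
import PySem

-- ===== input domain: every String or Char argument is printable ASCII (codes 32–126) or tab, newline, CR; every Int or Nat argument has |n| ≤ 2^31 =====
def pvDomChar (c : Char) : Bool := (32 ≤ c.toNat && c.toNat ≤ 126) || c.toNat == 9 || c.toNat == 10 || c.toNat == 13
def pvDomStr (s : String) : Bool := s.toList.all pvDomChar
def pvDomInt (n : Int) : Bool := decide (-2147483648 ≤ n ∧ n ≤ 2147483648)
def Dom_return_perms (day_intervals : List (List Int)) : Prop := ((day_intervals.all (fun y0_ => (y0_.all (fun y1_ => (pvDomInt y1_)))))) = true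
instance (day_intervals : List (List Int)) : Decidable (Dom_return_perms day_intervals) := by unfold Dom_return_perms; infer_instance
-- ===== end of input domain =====

-- B replaces A's staged iterative tuple-extension with a structural recursion building tuples back-to-front (simpler, same cost).

-- ===== PORT A =====
-- literal transliteration of A's nested index loops (indices always in range inside Pre_;
-- getD defaults are only reached outside Pre_, where Python raises IndexError)
def return_perms (day_intervals : List (List Int)) : List (List Int) :=
  let lists := day_intervals
  let l0 := lists.getD 0 []
  let l1 := lists.getD 1 []
  let init : List (List Int) :=
    (List.range l0.length).foldl (fun acc i =>
      (List.range l1.length).foldl (fun acc ii =>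
        acc ++ [[l0.getD i 0, l1.getD ii 0]]) acc) []
  (List.range (lists.length - 2)).foldl (fun final_list l =>
    let ll := lists.getD (l + 2) []
    (List.range final_list.length).foldl (fun inter_list i =>
      (List.range ll.length).foldl (fun inter_list ii =>
        inter_list ++ [final_list.getD i [] ++ [ll.getD ii 0]]) inter_list) []) init

-- ===== PORT B =====
-- structural recursion: product of the tail first, then prepend each head element
def return_perms_alt (day_intervals : List (List Int)) : List (List Int) :=
  match day_intervals with
  | [] => [[]]
  | xs :: rest => xs.flatMap (fun x => (return_perms_alt rest).map (fun p => x :: p))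

-- ===== PRECONDITION & SPEC =====
-- Pre_ excludes inputs with fewer than two lists other than [[]]: there A's unconditional
-- lists[0]/lists[1] accesses raise IndexError (on [[]] the empty outer loop returns []).
def Pre_return_perms (day_intervals : List (List Int)) : Prop :=
  2 ≤ day_intervals.length ∨ day_intervals = [[]]
instance (day_intervals : List (List Int)) : Decidable (Pre_return_perms day_intervals) := by unfold Pre_return_perms; infer_instance
def pvWitness_return_perms : List (List Int) := [[1, 2], [3], [4, 5]]
def Spec_return_perms (day_intervals : List (List Int)) (out : List (List Int)) : Prop := out = return_perms_alt day_intervals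
instance (day_intervals : List (List Int)) (out : List (List Int)) : Decidable (Spec_return_perms day_intervals out) := by unfold Spec_return_perms; infer_instance

-- ===== CLAIM (what is proved, stated in full; the proofs are below) =====
def Claim_equal_return_perms : Prop := ∀ (day_intervals : List (List Int)), Dom_return_perms day_intervals → Pre_return_perms day_intervals → Spec_return_perms day_intervals (return_perms day_intervals)

-- ===== LEMMAS AND PROOFS =====

-- a foldl over range(len xs) reading xs.getD i is a foldl over xs
theorem foldl_range_getD {α β : Type} (xs : List α) (d : α) (F : β → α → β) :
    ∀ (a : β), (List.range xs.length).foldl (fun a i => F a (xs.getD i d)) a = xs.foldl F a := by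
  induction xs with
  | nil => intro a; simp
  | cons x xs ih =>
    intro a
    simp only [List.length_cons, List.range_succ_eq_map, List.foldl_cons, List.foldl_map]
    simpa using ih (F a x)

-- a foldl appending g x for each x is append of flatMap
theorem foldl_append_flatMap {α β : Type} (g : α → List β) :
    ∀ (xs : List α) (a : List β), xs.foldl (fun a x => a ++ g x) a = a ++ xs.flatMap g := by
  intro xs
  induction xs with
  | nil => intro a; simp
  | cons x xs ih => intro a; simp [ih]

theorem foldl_append_map {α β : Type} (f : α → β) (xs : List α) :
    ∀ (a : List β), xs.foldl (fun a x => a ++ [f x]) a = a ++ xs.map f := by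
  induction xs with
  | nil => intro a; simp
  | cons x xs ih => intro a; simp [ih]

theorem foldl_congr_fun {α β : Type} (xs : List α) (f g : β → α → β)
    (h : ∀ a x, f a x = g a x) (a : β) : xs.foldl f a = xs.foldl g a := by
  have hfg : f = g := funext fun a => funext fun x => h a x
  rw [hfg]

theorem inner_loops_eq (final_list : List (List Int)) (ll : List Int) :
    (List.range final_list.length).foldl (fun inter_list i =>
      (List.range ll.length).foldl (fun inter_list ii =>
        inter_list ++ [final_list.getD i [] ++ [ll.getD ii 0]]) inter_list) []
    = final_list.flatMap (fun p => ll.map (fun x => p ++ [x])) := by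
  rw [foldl_range_getD final_list []
      (fun inter_list p => (List.range ll.length).foldl (fun inter_list ii =>
        inter_list ++ [p ++ [ll.getD ii 0]]) inter_list)]
  have h : ∀ (p : List Int) (a : List (List Int)),
      (List.range ll.length).foldl (fun a ii => a ++ [p ++ [ll.getD ii 0]]) a
      = a ++ ll.map (fun x => p ++ [x]) := by
    intro p a
    rw [foldl_range_getD ll 0 (fun a x => a ++ [p ++ [x]])]
    exact foldl_append_map _ ll a
  rw [foldl_congr_fun final_list _ _ (fun a p => h p a)]
  simpa using foldl_append_flatMap (fun p => ll.map (fun x => p ++ [x])) final_list []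

-- A's staged fold, seeded with any partial-tuple list, equals appending B's recursive product
theorem foldl_step_eq_alt (rest : List (List Int)) :
    ∀ (acc : List (List Int)),
      rest.foldl (fun acc xs => acc.flatMap (fun p => xs.map (fun x => p ++ [x]))) acc
      = acc.flatMap (fun p => (return_perms_alt rest).map (fun q => p ++ q)) := by
  induction rest with
  | nil => intro acc; simp [return_perms_alt]
  | cons xs rest ih =>
    intro acc
    rw [List.foldl_cons, ih]
    simp [return_perms_alt, List.map_flatMap, List.flatMap_map,
      List.map_map, Function.comp_def, List.flatMap_assoc, List.append_assoc]

theorem return_perms_spec : Claim_equal_return_perms := by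
  intro day_intervals _hd hpre
  unfold Spec_return_perms
  match day_intervals, hpre with
  | [[]], _ => decide
  | l0 :: l1 :: rest, _ =>
    show return_perms (l0 :: l1 :: rest) = return_perms_alt (l0 :: l1 :: rest)
    unfold return_perms
    simp only [show ((l0 :: l1 :: rest) : List (List Int)).getD 0 [] = l0 from rfl,
               show ((l0 :: l1 :: rest) : List (List Int)).getD 1 [] = l1 from rfl,
               show (∀ l, ((l0 :: l1 :: rest) : List (List Int)).getD (l + 2) [] = rest.getD l [])
                 from fun _ => rfl,
               show ((l0 :: l1 :: rest) : List (List Int)).length - 2 = rest.length by simp]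
    have hinit :
        (List.range l0.length).foldl (fun acc i =>
          (List.range l1.length).foldl (fun acc ii =>
            acc ++ [[l0.getD i 0, l1.getD ii 0]]) acc) []
        = l0.flatMap (fun x => l1.map (fun y => [x, y])) := by
      rw [foldl_range_getD l0 0 (fun acc x => (List.range l1.length).foldl
            (fun acc ii => acc ++ [[x, l1.getD ii 0]]) acc)]
      have h : ∀ (x : Int) (a : List (List Int)),
          (List.range l1.length).foldl (fun a ii => a ++ [[x, l1.getD ii 0]]) a
          = a ++ l1.map (fun y => [x, y]) := by
        intro x a
        rw [foldl_range_getD l1 0 (fun a y => a ++ [[x, y]])]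
        exact foldl_append_map _ l1 a
      rw [foldl_congr_fun l0 _ _ (fun a x => h x a)]
      simpa using foldl_append_flatMap (fun x => l1.map (fun y => [x, y])) l0 []
    have houter : ∀ (init : List (List Int)),
        (List.range rest.length).foldl (fun final_list l =>
          (List.range final_list.length).foldl (fun inter_list i =>
            (List.range (rest.getD l []).length).foldl (fun inter_list ii =>
              inter_list ++ [final_list.getD i [] ++ [(rest.getD l []).getD ii 0]]) inter_list) []) init
        = rest.foldl (fun acc xs => acc.flatMap (fun p => xs.map (fun x => p ++ [x]))) init := by
      intro init
      rw [foldl_range_getD rest ([] : List Int)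
        (fun final_list ll =>
          (List.range final_list.length).foldl (fun inter_list i =>
            (List.range ll.length).foldl (fun inter_list ii =>
              inter_list ++ [final_list.getD i [] ++ [ll.getD ii 0]]) inter_list) [])]
      exact foldl_congr_fun rest _ _ (fun a xs => inner_loops_eq a xs) init
    rw [hinit, houter, foldl_step_eq_alt]
    show _ = return_perms_alt (l0 :: l1 :: rest)
    simp [return_perms_alt, List.flatMap_map, List.map_flatMap, List.flatMap_assoc, List.map_map, Function.comp_def]
  | [], h => exact absurd h (by simp [Pre_return_perms])
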